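-- pv_equiv track=rewrite | github.com/rrosevic/comp110-22f-workspace | lessons/quiz02practice.py | vowels_and_threes
-- ===== SOURCE A (Python) =====
-- def vowels_and_threes(string: str) -> str:
--     """Returns vowels and chars at every third index."""
--     vowels: list[str] = ["a", "e", "i", "o", "u"]
--     result: str = ""
--     i: int = 0
--     is_vowel: bool = False
--     while i < len(string):
--         for v in vowels:
--             if v == string[i]:
--                 result += string[i]
--             if v == string[i] and i % 3 == 0:
--                 result = ""
--         if i % 3 == 0:
--             result += string[i]
--         i += 1
--     return result
-- ===== SOURCE B (Python) =====
-- def vowels_and_threes(string: str) -> str: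
--     """Two-pass rewrite: A's mid-loop reset means only the suffix after the
--     last vowel at a multiple-of-3 index survives; find that start index,
--     then collect the kept chars in one forward pass."""
--     vowels = "aeiou"
--     start = 0
--     i = 0
--     while i < len(string):
--         if string[i] in vowels:
--             start = i
--         i += 3
--     out = []
--     i = start
--     while i < len(string):
--         if i % 3 == 0 or string[i] in vowels:
--             out.append(string[i])
--         i += 1
--     return "".join(out)
-- ===== Notes on version B (the rewrite author's own statement) =====
-- stated objective: simpler
-- what changed: Replaced A's single pass with an inner 5-way vowel loop and mid-loop result reset by two plain passes: first find the last multiple-of-3 index holding a vowel (the point after which A's result survives), then collect chars with i%3==0 or a vowel from there; avoiding the repeated string re-building also makes B measurably faster by a constant factor.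
import Mathlib
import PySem

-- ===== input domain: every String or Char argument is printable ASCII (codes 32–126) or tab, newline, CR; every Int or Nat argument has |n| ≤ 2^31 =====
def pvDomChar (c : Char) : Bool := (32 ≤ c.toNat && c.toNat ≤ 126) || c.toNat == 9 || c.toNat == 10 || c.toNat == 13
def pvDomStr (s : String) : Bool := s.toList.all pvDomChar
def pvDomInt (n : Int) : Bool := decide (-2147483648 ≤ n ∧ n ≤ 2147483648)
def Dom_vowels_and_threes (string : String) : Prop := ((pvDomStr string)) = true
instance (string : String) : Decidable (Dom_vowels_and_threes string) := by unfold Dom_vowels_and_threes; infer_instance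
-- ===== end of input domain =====

-- B replaces A's single pass with inner vowel loop and mid-loop reset by two plain passes:
-- find the last multiple-of-3 index holding a vowel, then collect kept chars from there (objective: simpler).

-- ===== PORT A =====
-- Python's vowels list ["a","e","i","o","u"]
def vowelsA : List Char := ['a', 'e', 'i', 'o', 'u']

-- the while loop of A: state (i, result); inner `for v in vowels` is the foldl
def goA (s : List Char) (i : Nat) (result : List Char) : List Char :=
  if h : i < s.length then
    let c := s[i]
    let r1 := vowelsA.foldl (fun r v =>
      let r' := if v == c then r ++ [c] else r
      if v == c && i % 3 == 0 then [] else r') result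
    let r2 := if i % 3 == 0 then r1 ++ [c] else r1
    goA s (i + 1) r2
  else result
termination_by s.length - i

def vowels_and_threes (string : String) : String :=
  String.mk (goA string.toList 0 [])

-- ===== PORT B =====
def vowelsB : List Char := "aeiou".toList

-- first while loop of Source B: i steps by 3, `start` records the last vowel position seen
def findStartB (s : List Char) (i st : Nat) : Nat :=
  if h : i < s.length then
    findStartB s (i + 3) (if vowelsB.contains s[i] then i else st)
  else st
termination_by s.length - i

-- second while loop of Source B: append the kept chars to `out`
def buildOutB (s : List Char) (i : Nat) (out : List Char) : List Char :=
  if h : i < s.length then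
    buildOutB s (i + 1) (if i % 3 == 0 || vowelsB.contains s[i] then out ++ [s[i]] else out)
  else out
termination_by s.length - i

def vowels_and_threes_alt (string : String) : String :=
  String.mk (buildOutB string.toList (findStartB string.toList 0 0) [])

-- ===== PRECONDITION & SPEC =====
def Spec_vowels_and_threes (string : String) (out : String) : Prop := out = vowels_and_threes_alt string
instance (string : String) (out : String) : Decidable (Spec_vowels_and_threes string out) := by unfold Spec_vowels_and_threes; infer_instance

-- ===== CLAIM (what is proved, stated in full; the proofs are below) =====
def Claim_equal_vowels_and_threes : Prop := ∀ (string : String), Dom_vowels_and_threes string → Spec_vowels_and_threes string (vowels_and_threes string)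

-- ===== LEMMAS AND PROOFS =====

-- the kept suffix starting at index i (proof-side characterisation)
def keepL (s : List Char) (i : Nat) : List Char :=
  if h : i < s.length then
    (if i % 3 == 0 || vowelsB.contains s[i] then [s[i]] else []) ++ keepL s (i + 1)
  else []
termination_by s.length - i

-- the last index j ≥ i with j % 3 = 0 and s[j] a vowel (proof-side characterisation)
def lastR (s : List Char) (i : Nat) : Option Nat :=
  if h : i < s.length then
    match lastR s (i + 1) with
    | some j => some j
    | none => if i % 3 == 0 && vowelsB.contains s[i] then some i else none
  else none
termination_by s.length - i

lemma keepL_step (s : List Char) (i : Nat) (h : i < s.length) :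
    keepL s i = (if i % 3 == 0 || vowelsB.contains s[i] then [s[i]] else []) ++ keepL s (i + 1) := by
  rw [keepL, dif_pos h]

lemma keepL_stop (s : List Char) (i : Nat) (h : ¬ i < s.length) :
    keepL s i = [] := by
  rw [keepL, dif_neg h]

lemma lastR_step (s : List Char) (i : Nat) (h : i < s.length) :
    lastR s i = (match lastR s (i + 1) with
      | some j => some j
      | none => if i % 3 == 0 && vowelsB.contains s[i] then some i else none) := by
  rw [lastR, dif_pos h]

lemma lastR_stop (s : List Char) (i : Nat) (h : ¬ i < s.length) :
    lastR s i = none := by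
  rw [lastR, dif_neg h]

lemma inner_eval (c : Char) (r : List Char) (i : Nat) :
    vowelsA.foldl (fun r v =>
      let r' := if v == c then r ++ [c] else r
      if v == c && i % 3 == 0 then [] else r') r
    = if vowelsB.contains c then (if i % 3 == 0 then [] else r ++ [c]) else r := by
  by_cases h1 : 'a' = c
  · subst h1; simp [vowelsA, vowelsB, List.foldl]
  · by_cases h2 : 'e' = c
    · subst h2; simp [vowelsA, vowelsB, List.foldl]
    · by_cases h3 : 'i' = c
      · subst h3; simp [vowelsA, vowelsB, List.foldl]
      · by_cases h4 : 'o' = c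
        · subst h4; simp [vowelsA, vowelsB, List.foldl]
        · by_cases h5 : 'u' = c
          · subst h5; simp [vowelsA, vowelsB, List.foldl]
          · have hm : c ∉ vowelsB := by
              intro hmem
              rcases (by simpa [vowelsB] using hmem : c = 'a' ∨ c = 'e' ∨ c = 'i' ∨ c = 'o' ∨ c = 'u') with
                h | h | h | h | h
              exacts [h1 h.symm, h2 h.symm, h3 h.symm, h4 h.symm, h5 h.symm]
            simp [vowelsA, List.foldl, h1, h2, h3, h4, h5, hm]

lemma goA_eq (s : List Char) (i : Nat) (r : List Char) :
    goA s i r = match lastR s i with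
      | none => r ++ keepL s i
      | some j => keepL s j := by
  by_cases h : i < s.length
  · rw [goA, dif_pos h]
    simp only [inner_eval]
    rw [goA_eq s (i + 1), lastR_step s i h]
    have hk := keepL_step s i h
    cases lastR s (i + 1) with
    | some j => simp
    | none =>
      by_cases h3 : i % 3 = 0 <;> by_cases hv : s[i] ∈ vowelsB <;>
        simp [h3, hv, hk]
  · rw [goA, dif_neg h, lastR_stop s i h, keepL_stop s i h]
    simp
termination_by s.length - i

lemma buildOutB_eq (s : List Char) (i : Nat) (out : List Char) :
    buildOutB s i out = out ++ keepL s i := by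
  by_cases h : i < s.length
  · rw [buildOutB, dif_pos h, buildOutB_eq s (i + 1), keepL_step s i h]
    cases hc : (i % 3 == 0 || vowelsB.contains s[i]) <;> simp [*]
  · rw [buildOutB, dif_neg h, keepL_stop s i h]
    simp
termination_by s.length - i

lemma lastR_skip (s : List Char) (i : Nat) (h3 : i % 3 ≠ 0) :
    lastR s i = lastR s (i + 1) := by
  by_cases h : i < s.length
  · rw [lastR_step s i h]
    cases hl : lastR s (i + 1) <;> simp [h3]
  · rw [lastR_stop s i h, lastR_stop s (i + 1) (by omega)]

lemma findStartB_eq (s : List Char) (i st : Nat) (h3 : i % 3 = 0) :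
    findStartB s i st = (lastR s i).getD st := by
  by_cases h : i < s.length
  · rw [findStartB, dif_pos h, findStartB_eq s (i + 3) _ (by omega)]
    have e1 : lastR s (i + 1) = lastR s (i + 2) := lastR_skip s (i + 1) (by omega)
    have e2 : lastR s (i + 2) = lastR s (i + 3) := lastR_skip s (i + 2) (by omega)
    rw [lastR_step s i h, e1, e2]
    cases lastR s (i + 3) <;>
      by_cases hv : s[i] ∈ vowelsB <;>
        simp [hv, h3]
  · rw [findStartB, dif_neg h, lastR_stop s i h]; rfl
termination_by s.length - i

-- ===== VERDICT (by name: the statement is the Claim_ definition above) =====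
theorem vowels_and_threes_spec : Claim_equal_vowels_and_threes := by
  intro string _
  unfold Spec_vowels_and_threes vowels_and_threes vowels_and_threes_alt
  rw [goA_eq, buildOutB_eq, findStartB_eq _ _ _ (by omega)]
  cases lastR string.toList 0 <;> simp
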